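-- pv_equiv track=rewrite | github.com/Marblesoul/PYARE | main.py | group_contacts
-- ===== SOURCE A (Python) =====
-- def group_contacts(contacts: list):
--     result = {}
--     for contact in contacts:
--         key = tuple(contact[0:2])
--         if key not in result:
--             result[key] = contact
--         else:
--             result[key] = [
--                 result[key][i] or contact[i] for i in range(len(contact))
--             ]
--     return list(result.values())
-- ===== SOURCE B (Python) =====
-- def group_contacts(contacts: list):
--     groups = {}
--     for contact in contacts:
--         groups.setdefault(tuple(contact[0:2]), []).append(contact)
--     out = []
--     for group in groups.values():
--         merged = group[0]
--         for contact in group[1:]: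
--             merged = [merged[i] or contact[i] for i in range(len(contact))]
--         out.append(merged)
--     return out
-- ===== Notes on version B (the rewrite author's own statement) =====
-- stated objective: alternative
-- what changed: B first groups the contacts into an ordered dict key -> list of contacts, then reduces each group left-to-right with the same merge step, instead of A's interleaved merge-on-insert into a single dict of merged contacts.
import Mathlib
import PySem

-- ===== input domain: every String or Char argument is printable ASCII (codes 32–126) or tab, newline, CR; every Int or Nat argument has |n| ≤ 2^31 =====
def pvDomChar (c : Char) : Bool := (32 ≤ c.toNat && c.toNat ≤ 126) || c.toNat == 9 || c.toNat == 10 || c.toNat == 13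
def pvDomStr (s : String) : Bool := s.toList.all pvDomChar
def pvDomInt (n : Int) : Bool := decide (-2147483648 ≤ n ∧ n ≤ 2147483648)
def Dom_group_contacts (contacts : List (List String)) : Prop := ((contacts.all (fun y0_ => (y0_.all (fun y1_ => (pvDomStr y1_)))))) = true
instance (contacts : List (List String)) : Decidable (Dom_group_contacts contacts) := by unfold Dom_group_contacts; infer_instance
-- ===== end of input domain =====

-- B first groups the contacts by key into an ordered dict and reduces each group afterwards,
-- instead of A's merge-on-insert into a single dict (different decomposition, same cost).

-- shared merge step, [acc[i] or contact[i] for i in range(len(contact))]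
-- (acc[i] rendered totally via pyGetD ""; Python raises IndexError when acc is shorter,
--  those inputs are excluded by Pre_ below)
def pvMerge (acc contact : List String) : List String :=
  (PySem.List.pyRange 0 (contact.length : Int) 1).map (fun i =>
    let a := PySem.List.pyGetD acc i ""
    if a ≠ "" then a else PySem.List.pyGetD contact i "")

-- ===== PORT A =====
def group_contacts (contacts : List (List String)) : List (List String) :=
  (contacts.foldl
    (fun (result : PySem.Dict (List String) (List String)) contact =>
      let key := PySem.List.slice contact (some 0) (some 2)
      if result.contains key = false then
        result.insert key contact
      else
        result.insert key (pvMerge (result.getD key []) contact))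
    PySem.Dict.empty).values

-- ===== PORT B =====
def group_contacts_alt (contacts : List (List String)) : List (List String) :=
  let groups := contacts.foldl
    (fun (d : PySem.Dict (List String) (List (List String))) contact =>
      let key := PySem.List.slice contact (some 0) (some 2)
      d.insert key (d.getD key [] ++ [contact]))
    PySem.Dict.empty
  groups.values.map (fun group =>
    match group with
    | [] => []
    | first :: rest => rest.foldl pvMerge first)

-- ===== PRECONDITION & SPEC =====
-- Pre_ excludes exactly the inputs on which Python A raises IndexError (a contact longer than
-- the previously accumulated contact of the same key); Python B raises the same error there.
def Pre_group_contacts (contacts : List (List String)) : Prop :=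
  contacts.Pairwise (fun a b =>
    PySem.List.slice a (some 0) (some 2) = PySem.List.slice b (some 0) (some 2) →
    b.length ≤ a.length)
instance (contacts : List (List String)) : Decidable (Pre_group_contacts contacts) := by
  unfold Pre_group_contacts; infer_instance
def pvWitness_group_contacts : List (List String) :=
  [["a", "b", "1"], ["a", "b", ""], ["c"]]
def Spec_group_contacts (contacts : List (List String)) (out : List (List String)) : Prop := out = group_contacts_alt contacts
instance (contacts : List (List String)) (out : List (List String)) : Decidable (Spec_group_contacts contacts out) := by unfold Spec_group_contacts; infer_instance

-- ===== CLAIM (what is proved, stated in full; the proofs are below) =====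
def Claim_equal_group_contacts : Prop := ∀ (contacts : List (List String)), Dom_group_contacts contacts → Pre_group_contacts contacts → Spec_group_contacts contacts (group_contacts contacts)

-- ===== LEMMAS AND PROOFS =====
-- (the two total Lean ports agree on every input; Dom_/Pre_ are not needed by the proof,
--  Pre_ only delimits where the Python programs return instead of raising)

-- reduce a group left-to-right with pvMerge (the lambda of group_contacts_alt, named)
def pvReduce (g : List (List String)) : List String :=
  match g with
  | [] => []
  | first :: rest => rest.foldl pvMerge first

-- value map relating A's dict entries to B's group entries
def pvF (p : List String × List (List String)) : List String × List String :=
  (p.1, pvReduce p.2)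

lemma pvMerge_nil (c : List String) : pvMerge [] c = c := by
  have h : ∀ i : Int, PySem.List.pyGetD ([] : List String) i "" = "" := by
    intro i
    simp [PySem.List.pyGetD, PySem.List.pyGet?, PySem.List.pyIdx?]
  unfold pvMerge
  simp only [h, ne_eq, not_true_eq_false, if_false]
  exact PySem.List.map_pyGetD_pyRange_zero' c ""

lemma pvReduce_append (g : List (List String)) (c : List String) :
    pvReduce (g ++ [c]) = pvMerge (pvReduce g) c := by
  cases g with
  | nil => simp [pvReduce, pvMerge_nil]
  | cons h t => simp [pvReduce, List.foldl_append]

-- the loop invariant: A's dict is B's group dict with every group reduced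
lemma pv_fold_inv (contacts : List (List String)) :
    ∀ (dA : PySem.Dict (List String) (List String))
      (dB : PySem.Dict (List String) (List (List String))),
      dB.keys.Nodup →
      dA.items = dB.items.map pvF →
      (contacts.foldl
        (fun result contact =>
          let key := PySem.List.slice contact (some 0) (some 2)
          if result.contains key = false then
            result.insert key contact
          else
            result.insert key (pvMerge (result.getD key []) contact)) dA).items
      = ((contacts.foldl
        (fun d contact =>
          let key := PySem.List.slice contact (some 0) (some 2)
          d.insert key (d.getD key [] ++ [contact])) dB).items).map pvF := by
  induction contacts with
  | nil => intro dA dB _ h; exact h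
  | cons c cs ih =>
    intro dA dB hnd h
    simp only [List.foldl_cons]
    have hkeys : dA.keys = dB.keys := by
      simp only [PySem.Dict.keys, h, List.map_map]
      rfl
    have hndA : dA.keys.Nodup := by rw [hkeys]; exact hnd
    have hcont : dA.contains (PySem.List.slice c (some 0) (some 2))
        = dB.contains (PySem.List.slice c (some 0) (some 2)) := by
      rw [PySem.Dict.contains_eq_decide_mem_keys, PySem.Dict.contains_eq_decide_mem_keys, hkeys]
    by_cases hc : dB.contains (PySem.List.slice c (some 0) (some 2)) = true
    · -- key already present: both overwrite in place
      have hcA : dA.contains (PySem.List.slice c (some 0) (some 2)) = true := by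
        rw [hcont]; exact hc
      have hmem : (PySem.List.slice c (some 0) (some 2)) ∈ dB.keys :=
        (PySem.Dict.contains_iff_mem_keys _ _).mp hc
      obtain ⟨g, hg⟩ : ∃ g, (PySem.List.slice c (some 0) (some 2), g) ∈ dB.items := by
        simpa [PySem.Dict.keys] using hmem
      have hBg : dB.getD (PySem.List.slice c (some 0) (some 2)) [] = g :=
        PySem.Dict.getD_of_mem_items dB hg hnd []
      have hAg : dA.getD (PySem.List.slice c (some 0) (some 2)) [] = pvReduce g := by
        apply PySem.Dict.getD_of_mem_items dA _ hndA
        have : pvF (PySem.List.slice c (some 0) (some 2), g) ∈ dA.items := by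
          rw [h]; exact List.mem_map_of_mem hg
        simpa [pvF] using this
      rw [if_neg (by rw [hcA]; simp)]
      apply ih
      · exact PySem.Dict.nodup_keys_insert _ _ _ hnd
      · rw [PySem.Dict.items_insert_of_contains _ _ hcA,
            PySem.Dict.items_insert_of_contains _ _ hc, h]
        simp only [List.map_map]
        apply List.map_congr_left
        intro q _
        by_cases hqk : q.1 == (PySem.List.slice c (some 0) (some 2))
        · simp only [Function.comp, pvF, hqk, if_pos]
          rw [hAg, hBg, pvReduce_append]
        · simp only [Function.comp, pvF, hqk]
          simp
    · -- new key: both append at the end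
      have hc' : dB.contains (PySem.List.slice c (some 0) (some 2)) = false := by
        simpa using hc
      have hcA : dA.contains (PySem.List.slice c (some 0) (some 2)) = false := by
        rw [hcont]; exact hc'
      rw [if_pos hcA]
      apply ih
      · exact PySem.Dict.nodup_keys_insert _ _ _ hnd
      · rw [PySem.Dict.items_insert_of_not_contains _ _ hcA,
            PySem.Dict.items_insert_of_not_contains _ _ hc',
            PySem.Dict.getD_of_not_contains _ _ hc', h]
        simp [pvF, pvReduce]

-- ===== VERDICT (by name: the statement is the Claim_ definition above) =====
theorem group_contacts_spec : Claim_equal_group_contacts := by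
  intro contacts _ _
  show group_contacts contacts = group_contacts_alt contacts
  unfold group_contacts group_contacts_alt
  simp only [PySem.Dict.values]
  rw [pv_fold_inv contacts PySem.Dict.empty PySem.Dict.empty (by simp) rfl]
  simp only [List.map_map]
  apply List.map_congr_left
  intro p _
  rfl
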